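-- pv_equiv track=rewrite | github.com/Naman-Priyadarshi/benchexec | benchexec/tablegenerator/util.py | merge_entries_with_common_prefixes
-- ===== SOURCE A (Python) =====
-- def split_string_at_suffix(s, numbers_into_suffix=False):
--     """
--     Split a string into two parts: a prefix and a suffix. Splitting is done from the end,
--     so the split is done around the position of the last digit in the string
--     (that means the prefix may include any character, mixing digits and chars).
--     The flag 'numbers_into_suffix' determines whether the suffix consists of digits or non-digits.
--     """
--     if not s:
--         return s, ""
--     pos = len(s)
--     while pos and numbers_into_suffix == s[pos - 1].isdigit():
--         pos -= 1
--     return s[:pos], s[pos:]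
--
-- def merge_entries_with_common_prefixes(list_, number_of_needed_commons=6):
--     """
--     Returns a list where sequences of post-fixed entries are shortened to their common prefix.
--     This might be useful in cases of several similar values,
--     where the prefix is identical for several entries.
--     If less than 'number_of_needed_commons' are identically prefixed, they are kept unchanged.
--     Example: ['test', 'pc1', 'pc2', 'pc3', ... , 'pc10'] -> ['test', 'pc*']
--     """
--     # first find common entry-sequences
--     prefix = None
--     lists_to_merge = []
--     for entry in list_:
--         newPrefix, number = split_string_at_suffix(entry, numbers_into_suffix=True)
--         if entry == newPrefix or prefix != newPrefix:
--             lists_to_merge.append([])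
--             prefix = newPrefix
--         lists_to_merge[-1].append((entry, newPrefix, number))
--
--     # then merge them
--     returnvalue = []
--     for common_entries in lists_to_merge:
--         common_prefix = common_entries[0][1]
--         assert all(common_prefix == prefix for entry, prefix, number in common_entries)
--         if len(common_entries) <= number_of_needed_commons:
--             returnvalue.extend((entry for entry, prefix, number in common_entries))
--         else:
--             # we use '*' to indicate several entries,
--             # it would also be possible to use '[min,max]' from '(n for e,p,n in common_entries)'
--             returnvalue.append(common_prefix + "*")
--
--     return returnvalue
-- ===== SOURCE B (Python) =====
-- def split_string_at_suffix(s, numbers_into_suffix=False):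
--     if not s:
--         return s, ""
--     pos = len(s)
--     while pos and numbers_into_suffix == s[pos - 1].isdigit():
--         pos -= 1
--     return s[:pos], s[pos:]
--
-- def _flush(out, group, current_prefix, number_of_needed_commons):
--     """Emit a finished group: raw entries if small, otherwise 'prefix*'."""
--     if group:
--         if len(group) <= number_of_needed_commons:
--             out.extend(group)
--         else:
--             out.append(current_prefix + "*")
--
-- def merge_entries_with_common_prefixes(list_, number_of_needed_commons=6):
--     """Single pass: maintain the running group and flush it inline."""
--     out = []
--     current_prefix = None
--     group = []
--     for entry in list_:
--         newPrefix = split_string_at_suffix(entry, numbers_into_suffix=True)[0]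
--         if entry == newPrefix or newPrefix != current_prefix:
--             _flush(out, group, current_prefix, number_of_needed_commons)
--             group = []
--             current_prefix = newPrefix
--         group.append(entry)
--     _flush(out, group, current_prefix, number_of_needed_commons)
--     return out
-- ===== Notes on version B (the rewrite author's own statement) =====
-- stated objective: simpler
-- what changed: Replaced A's two-phase design (build an intermediate list-of-lists of (entry,prefix,number) triples, then merge it in a second loop) by a single pass that keeps only the current prefix and the current group of entries and flushes each finished group to the output inline.
import Mathlib
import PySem

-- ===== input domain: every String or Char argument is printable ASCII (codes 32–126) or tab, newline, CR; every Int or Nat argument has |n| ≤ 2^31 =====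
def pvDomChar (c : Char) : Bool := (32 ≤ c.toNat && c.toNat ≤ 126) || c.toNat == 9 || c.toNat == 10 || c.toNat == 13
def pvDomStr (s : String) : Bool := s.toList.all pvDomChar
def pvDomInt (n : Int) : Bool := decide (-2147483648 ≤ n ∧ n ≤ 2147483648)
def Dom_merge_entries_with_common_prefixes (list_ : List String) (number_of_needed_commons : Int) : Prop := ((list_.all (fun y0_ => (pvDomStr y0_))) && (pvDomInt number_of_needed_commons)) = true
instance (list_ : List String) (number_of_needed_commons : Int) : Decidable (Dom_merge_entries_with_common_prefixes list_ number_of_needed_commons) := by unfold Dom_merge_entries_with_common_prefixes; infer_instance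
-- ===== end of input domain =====

-- B replaces A's two phases (build a list of groups, then merge them) by a single pass
-- that keeps only the running group and flushes it inline (objective: simpler).

-- ===== PORT A =====
-- split_string_at_suffix's while loop over `pos` (with numbers_into_suffix=True);
-- Python's str.isdigit agrees with Char.isDigit on the printable-ASCII domain.
def pvSplitPos (cs : List Char) : Nat → Nat
  | 0 => 0
  | p + 1 => if ((cs.getD p ' ').isDigit) then pvSplitPos cs p else p + 1

-- split_string_at_suffix(s, numbers_into_suffix=True) → (s[:pos], s[pos:])
def pvSplit (s : String) : String × String :=
  let cs := s.toList
  let pos := pvSplitPos cs cs.length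
  (String.ofList (cs.take pos), String.ofList (cs.drop pos))

-- lists_to_merge[-1].append(x)
def pvAppendLast (ls : List (List (String × String × String))) (x : String × String × String) :
    List (List (String × String × String)) :=
  match ls with
  | [] => []
  | [l] => [l ++ [x]]
  | l :: ls => l :: pvAppendLast ls x

-- one iteration of A's first loop, state = (prefix, lists_to_merge)
def pvStepA (st : Option String × List (List (String × String × String))) (entry : String) :
    Option String × List (List (String × String × String)) :=
  let newPrefix := (pvSplit entry).1
  let number := (pvSplit entry).2
  let st' :=
    if entry = newPrefix ∨ st.1 ≠ some newPrefix then (some newPrefix, st.2 ++ [[]])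
    else st
  (st'.1, pvAppendLast st'.2 (entry, newPrefix, number))

-- A's second loop ("then merge them"); common_entries[0][1] via headD
def pvMergeGroups (n : Int) (lists : List (List (String × String × String))) : List String :=
  lists.foldl
    (fun rv g =>
      let common_prefix := (g.headD ("", "", "")).2.1
      if (g.length : Int) ≤ n then rv ++ g.map (·.1)
      else rv ++ [common_prefix ++ "*"])
    []

def merge_entries_with_common_prefixes (list_ : List String) (number_of_needed_commons : Int) : List String :=
  pvMergeGroups number_of_needed_commons (list_.foldl pvStepA (none, [])).2

-- ===== PORT B =====
-- _flush(out, group, current_prefix, n); current_prefix is a str whenever group is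
-- nonempty, so the Option is read with getD "" only in the reachable case
def pvFlushB (n : Int) (out : List String) (group : List String) (cur : Option String) : List String :=
  if group = [] then out
  else if (group.length : Int) ≤ n then out ++ group
  else out ++ [cur.getD "" ++ "*"]

-- one iteration of B's loop, state = (out, current_prefix, group)
def pvStepB (n : Int) (st : List String × Option String × List String) (entry : String) :
    List String × Option String × List String :=
  let newPrefix := (pvSplit entry).1
  let st' :=
    if entry = newPrefix ∨ some newPrefix ≠ st.2.1 then
      (pvFlushB n st.1 st.2.2 st.2.1, some newPrefix, ([] : List String))
    else st
  (st'.1, st'.2.1, st'.2.2 ++ [entry])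

def merge_entries_with_common_prefixes_alt (list_ : List String) (number_of_needed_commons : Int) : List String :=
  let st := list_.foldl (pvStepB number_of_needed_commons) ([], none, [])
  pvFlushB number_of_needed_commons st.1 st.2.2 st.2.1

-- ===== PRECONDITION & SPEC =====
def Spec_merge_entries_with_common_prefixes (list_ : List String) (number_of_needed_commons : Int) (out : List String) : Prop := out = merge_entries_with_common_prefixes_alt list_ number_of_needed_commons
instance (list_ : List String) (number_of_needed_commons : Int) (out : List String) : Decidable (Spec_merge_entries_with_common_prefixes list_ number_of_needed_commons out) := by unfold Spec_merge_entries_with_common_prefixes; infer_instance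

-- ===== CLAIM (what is proved, stated in full; the proofs are below) =====
def Claim_equal_merge_entries_with_common_prefixes : Prop := ∀ (list_ : List String) (number_of_needed_commons : Int), Dom_merge_entries_with_common_prefixes list_ number_of_needed_commons → Spec_merge_entries_with_common_prefixes list_ number_of_needed_commons (merge_entries_with_common_prefixes list_ number_of_needed_commons)

-- ===== LEMMAS AND PROOFS =====

/-- Invariant tying A's state (prefix, lists_to_merge) to B's state (out, cur, group). -/
def pvInv (n : Int) (a : Option String × List (List (String × String × String)))
    (b : List String × Option String × List String) : Prop :=
  (a.1 = none ∧ a.2 = [] ∧ b.1 = [] ∧ b.2.1 = none ∧ b.2.2 = [])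
  ∨ (∃ done g p, a.2 = done ++ [g] ∧ g ≠ [] ∧ (∀ t ∈ g, t.2.1 = p) ∧ a.1 = some p
      ∧ b.1 = pvMergeGroups n done ∧ b.2.1 = some p ∧ b.2.2 = g.map (·.1))

theorem pvMergeGroups_append (n : Int) (l : List (List (String × String × String))) (g) :
    pvMergeGroups n (l ++ [g]) =
      (if ((g.length : Int) ≤ n) then pvMergeGroups n l ++ g.map (·.1)
       else pvMergeGroups n l ++ [(g.headD ("", "", "")).2.1 ++ "*"]) := by
  unfold pvMergeGroups
  rw [List.foldl_append]
  rfl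

/-- Flushing B's group computes exactly A's merge of that group. -/
theorem pvFlush_eq (n : Int) (done : List (List (String × String × String))) (g p)
    (hg : g ≠ []) (hp : ∀ t ∈ g, t.2.1 = p) :
    pvFlushB n (pvMergeGroups n done) (g.map (·.1)) (some p) = pvMergeGroups n (done ++ [g]) := by
  rw [pvMergeGroups_append]
  have hm : g.map (·.1) ≠ [] := by simpa using hg
  have hhead : (g.headD ("", "", "")).2.1 = p := by
    cases g with
    | nil => exact absurd rfl hg
    | cons t ts => exact hp t (List.mem_cons_self ..)
  rw [pvFlushB, if_neg hm, hhead]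
  simp

theorem pvAppendLast_append (ls : List (List (String × String × String))) (l x) :
    pvAppendLast (ls ++ [l]) x = ls ++ [l ++ [x]] := by
  induction ls with
  | nil => rfl
  | cons a as ih =>
    cases as with
    | nil => simp [pvAppendLast]
    | cons b bs => simpa [pvAppendLast] using ih

theorem pvStepA_pos (a) (e : String) (h : e = (pvSplit e).1 ∨ a.1 ≠ some (pvSplit e).1) :
    pvStepA a e = (some (pvSplit e).1,
      pvAppendLast (a.2 ++ [[]]) (e, (pvSplit e).1, (pvSplit e).2)) := by
  simp only [pvStepA]
  rw [if_pos h]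

theorem pvStepA_neg (a) (e : String) (h : ¬ (e = (pvSplit e).1 ∨ a.1 ≠ some (pvSplit e).1)) :
    pvStepA a e = (a.1, pvAppendLast a.2 (e, (pvSplit e).1, (pvSplit e).2)) := by
  simp only [pvStepA]
  rw [if_neg h]

theorem pvStepB_pos (n : Int) (b) (e : String) (h : e = (pvSplit e).1 ∨ some (pvSplit e).1 ≠ b.2.1) :
    pvStepB n b e = (pvFlushB n b.1 b.2.2 b.2.1, some (pvSplit e).1, [e]) := by
  simp only [pvStepB]
  rw [if_pos h]
  rfl

theorem pvStepB_neg (n : Int) (b) (e : String) (h : ¬ (e = (pvSplit e).1 ∨ some (pvSplit e).1 ≠ b.2.1)) :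
    pvStepB n b e = (b.1, b.2.1, b.2.2 ++ [e]) := by
  simp only [pvStepB]
  rw [if_neg h]

/-- One step of A and one step of B preserve the invariant. -/
theorem pvInv_step (n : Int) (a b) (h : pvInv n a b) (e : String) :
    pvInv n (pvStepA a e) (pvStepB n b e) := by
  obtain ⟨a1, a2⟩ := a
  obtain ⟨out, cur, grp⟩ := b
  rcases h with ⟨h1, h2, h3, h4, h5⟩ | ⟨done, g, p, h2, hg, hp, h1, h3, h4, h5⟩
  · -- both initial: the branch condition holds (prefix is None)
    obtain rfl : a1 = none := h1
    obtain rfl : a2 = ([] : List (List (String × String × String))) := h2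
    obtain rfl : out = ([] : List String) := h3
    obtain rfl : cur = (none : Option String) := h4
    obtain rfl : grp = ([] : List String) := h5
    rw [pvStepA_pos _ e (Or.inr (by simp)), pvStepB_pos n _ e (Or.inr (by simp))]
    refine Or.inr ⟨[], [(e, (pvSplit e).1, (pvSplit e).2)], (pvSplit e).1, ?_, ?_, ?_, ?_, ?_, ?_, ?_⟩ <;>
      simp [pvAppendLast, pvFlushB, pvMergeGroups]
  · obtain rfl : a2 = done ++ [g] := h2
    obtain rfl : a1 = some p := h1
    obtain rfl : out = pvMergeGroups n done := h3
    obtain rfl : cur = some p := h4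
    obtain rfl : grp = g.map (·.1) := h5
    by_cases hc : e = (pvSplit e).1 ∨ (some p : Option String) ≠ some (pvSplit e).1
    · -- new group starts in both programs
      have hcB : e = (pvSplit e).1 ∨ some (pvSplit e).1 ≠ (some p : Option String) := by
        rcases hc with hc | hc
        · exact Or.inl hc
        · exact Or.inr (fun hq => hc hq.symm)
      rw [pvStepA_pos _ e hc, pvStepB_pos n (pvMergeGroups n done, some p, g.map (·.1)) e hcB]
      refine Or.inr ⟨done ++ [g], [(e, (pvSplit e).1, (pvSplit e).2)], (pvSplit e).1,
        ?_, by simp, by simp, rfl, ?_, rfl, by simp⟩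
      · show pvAppendLast ((done ++ [g]) ++ [[]]) _ = _
        rw [show done ++ [g] ++ [([] : List (String × String × String))]
              = done ++ [g] ++ [[]] from rfl, pvAppendLast_append]
        rfl
      · show pvFlushB n (pvMergeGroups n done) (g.map (·.1)) (some p) = _
        exact pvFlush_eq n done g p hg hp
    · -- same group continues in both programs
      rw [not_or, not_not] at hc
      obtain ⟨hne, hpre⟩ := hc
      have hcA : ¬ (e = (pvSplit e).1 ∨ (some p : Option String) ≠ some (pvSplit e).1) := by
        rw [not_or, not_not]
        exact ⟨hne, hpre⟩
      have hcB : ¬ (e = (pvSplit e).1 ∨ some (pvSplit e).1 ≠ (some p : Option String)) := by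
        rw [not_or, not_not]
        exact ⟨hne, hpre.symm⟩
      rw [pvStepA_neg _ e hcA, pvStepB_neg n (pvMergeGroups n done, some p, g.map (·.1)) e hcB]
      refine Or.inr ⟨done, g ++ [(e, (pvSplit e).1, (pvSplit e).2)], p, ?_, by simp, ?_, rfl, rfl, rfl, by simp⟩
      · show pvAppendLast (done ++ [g]) _ = _
        rw [pvAppendLast_append]
      · intro t ht
        rcases List.mem_append.mp ht with ht | ht
        · exact hp t ht
        · simp at ht; subst ht
          exact (Option.some.inj hpre).symm

/-- The invariant propagates through the whole fold. -/
theorem pvInv_foldl (n : Int) (l : List String) (a b) (h : pvInv n a b) :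
    pvInv n (l.foldl pvStepA a) (l.foldl (pvStepB n) b) := by
  induction l generalizing a b with
  | nil => exact h
  | cons e es ih => exact ih _ _ (pvInv_step n a b h e)

/-- Final states related by the invariant yield the same result. -/
theorem pvInv_final (n : Int) (a b) (h : pvInv n a b) :
    pvMergeGroups n a.2 = pvFlushB n b.1 b.2.2 b.2.1 := by
  rcases h with ⟨h1, h2, h3, h4, h5⟩ | ⟨done, g, p, h2, hg, hp, h1, h3, h4, h5⟩
  · rw [h2, h3, h4, h5]; rfl
  · rw [h2, h3, h4, h5, pvFlush_eq n done g p hg hp]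

-- ===== VERDICT (by name: the statement is the Claim_ definition above) =====
theorem merge_entries_with_common_prefixes_spec : Claim_equal_merge_entries_with_common_prefixes := by
  intro list_ n _
  unfold Spec_merge_entries_with_common_prefixes merge_entries_with_common_prefixes
    merge_entries_with_common_prefixes_alt
  exact pvInv_final n _ _ (pvInv_foldl n list_ _ _ (Or.inl ⟨rfl, rfl, rfl, rfl, rfl⟩))
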